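-- pv_equiv track=rewrite | github.com/alexandraback/datacollection | solutions_5670465267826688_0/Python/jpsbur/C.py | pw
-- ===== SOURCE A (Python) =====
-- def mul (x, y):
--   xa, xb = x
--   ya, yb = y
--   if xa == '1':
--     return ya, xb * yb
--   elif ya == '1':
--     return xa, xb * yb
--   elif xa == 'i':
--     if ya == 'i':
--       return '1', -xb * yb
--     elif ya == 'j':
--       return 'k', xb * yb
--     elif ya == 'k':
--       return 'j', -xb * yb
--   elif xa == 'j':
--     if ya == 'i':
--       return 'k', -xb * yb
--     elif ya == 'j':
--       return '1', -xb * yb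
--     elif ya == 'k':
--       return 'i', xb * yb
--   elif xa == 'k':
--     if ya == 'i':
--       return 'j', xb * yb
--     elif ya == 'j':
--       return 'i', -xb * yb
--     elif ya == 'k':
--       return '1', -xb * yb
--   return False
--
-- def pw (x, a):
--   if a == 0:
--     return '1', 1
--   if a == 1:
--     return x
--   t = pw (x, a // 2)
--   t = mul (t, t)
--   if a % 2 == 1:
--     return mul (x, t)
--   return t
-- ===== SOURCE B (Python) =====
-- def pw(x, a):
--     u, c = x
--     coeff = c ** a
--     letter = '1' if (u == '1' or a % 2 == 0) else u
--     sign = -1 if (u != '1' and a % 4 in (2, 3)) else 1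
--     return (letter, sign * coeff)
-- ===== Notes on version B (the rewrite author's own statement) =====
-- stated objective: simpler
-- what changed: A's recursive square-and-multiply is replaced by a loop-free closed form: quaternion unit powers cycle with period 4, so x^a = (letter from a%2, sign from a%4, times c**a), with no mul helper and no recursion.
-- outside the precondition, e.g. on pw(('z', 1), 2): A returns False, B returns ('1', -1); on pw(('i', 2), -1): A does not finish within the time limit, B returns ('i', -0.5)
import Mathlib
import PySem

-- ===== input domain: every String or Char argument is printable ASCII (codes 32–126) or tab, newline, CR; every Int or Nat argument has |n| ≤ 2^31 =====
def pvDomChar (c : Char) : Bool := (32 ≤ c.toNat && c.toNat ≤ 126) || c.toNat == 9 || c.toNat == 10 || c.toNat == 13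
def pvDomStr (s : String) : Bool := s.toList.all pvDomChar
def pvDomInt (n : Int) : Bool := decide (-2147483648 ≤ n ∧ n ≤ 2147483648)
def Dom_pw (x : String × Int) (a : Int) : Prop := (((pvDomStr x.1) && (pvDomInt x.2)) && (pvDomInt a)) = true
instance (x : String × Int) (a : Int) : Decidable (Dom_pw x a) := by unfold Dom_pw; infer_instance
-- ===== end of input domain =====

-- B replaces A's recursive halving exponentiation by a loop-free closed form using the
-- period-4 cycle of quaternion unit powers; objective: simpler.


-- ===== PORT A =====
-- A's helper 'mul' ('qmul' here: 'mul' exists in Mathlib), a literal transliteration; the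
-- final 'return False' (not a String × Int) is rendered as the junk pair ("False", 0):
-- that branch is never reached on inputs admitted by Pre_.
def qmul (x y : String × Int) : String × Int :=
  if x.1 = "1" then (y.1, x.2 * y.2)
  else if y.1 = "1" then (x.1, x.2 * y.2)
  else if x.1 = "i" then
    (if y.1 = "i" then ("1", -x.2 * y.2)
     else if y.1 = "j" then ("k", x.2 * y.2)
     else if y.1 = "k" then ("j", -x.2 * y.2)
     else ("False", 0))
  else if x.1 = "j" then
    (if y.1 = "i" then ("k", -x.2 * y.2)
     else if y.1 = "j" then ("1", -x.2 * y.2)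
     else if y.1 = "k" then ("i", x.2 * y.2)
     else ("False", 0))
  else if x.1 = "k" then
    (if y.1 = "i" then ("j", x.2 * y.2)
     else if y.1 = "j" then ("i", -x.2 * y.2)
     else if y.1 = "k" then ("1", -x.2 * y.2)
     else ("False", 0))
  else ("False", 0)

-- A's recursion, indexed by the natural number a (for a ≥ 0, a // 2 = a.toNat / 2).
def pwNat (x : String × Int) (n : Nat) : String × Int :=
  if n = 0 then ("1", 1)
  else if n = 1 then x
  else
    let t := pwNat x (n / 2)
    let t2 := qmul t t
    if n % 2 = 1 then qmul x t2 else t2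
decreasing_by exact Nat.div_lt_self (by omega) (by omega)

-- For a < 0 the Python recurses forever (RecursionError; outside Pre_); the guard only
-- makes the port total there.
def pw (x : String × Int) (a : Int) : String × Int :=
  if a < 0 then ("1", 1) else pwNat x a.toNat

-- ===== PORT B =====
-- B's closed form: for a ≥ 0 (all Pre_ admits) Python's c ** a is c ^ a.toNat and
-- Python's a % 2, a % 4 agree with Lean's Int.emod.
def pw_alt (x : String × Int) (a : Int) : String × Int :=
  let coeff : Int := x.2 ^ a.toNat
  let letter : String := if x.1 = "1" ∨ a % 2 = 0 then "1" else x.1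
  let sign : Int := if x.1 ≠ "1" ∧ (a % 4 = 2 ∨ a % 4 = 3) then -1 else 1
  (letter, sign * coeff)

-- ===== PRECONDITION & SPEC =====
-- Pre_ excludes (i) a < 0, where A recurses without bound (RecursionError), and
-- (ii) a ≥ 2 with a first component outside {'1','i','j','k'}, where A either returns
-- the bool False (not a value of the declared pair type) or raises TypeError.
def Pre_pw (x : String × Int) (a : Int) : Prop :=
  0 ≤ a ∧ (a ≤ 1 ∨ x.1 = "1" ∨ x.1 = "i" ∨ x.1 = "j" ∨ x.1 = "k")
instance (x : String × Int) (a : Int) : Decidable (Pre_pw x a) := by unfold Pre_pw; infer_instance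

def pvWitness_pw : (String × Int) × Int := (("i", 2), 5)

def Spec_pw (x : String × Int) (a : Int) (out : String × Int) : Prop := out = pw_alt x a
instance (x : String × Int) (a : Int) (out : String × Int) : Decidable (Spec_pw x a out) := by unfold Spec_pw; infer_instance

-- ===== CLAIM (what is proved, stated in full; the proofs are below) =====
def Claim_equal_pw : Prop := ∀ (x : String × Int) (a : Int), Dom_pw x a → Pre_pw x a → Spec_pw x a (pw x a)

-- ===== LEMMAS AND PROOFS =====

-- the letters of genuine quaternion units
def validL (l : String) : Prop := l = "1" ∨ l = "i" ∨ l = "j" ∨ l = "k"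

lemma mul_one_left (r : String × Int) : qmul ("1", 1) r = r := by
  simp [qmul]

lemma mul_one_right (r : String × Int) : qmul r ("1", 1) = r := by
  rcases r with ⟨l, c⟩
  by_cases h : l = "1" <;> simp [qmul, h]

lemma validL_mul {a b : String × Int} (ha : validL a.1) (hb : validL b.1) :
    validL (qmul a b).1 := by
  obtain ⟨la, ca⟩ := a; obtain ⟨lb, cb⟩ := b
  rcases ha with rfl | rfl | rfl | rfl <;> rcases hb with rfl | rfl | rfl | rfl <;>
    simp [qmul, validL]

lemma mul_assoc_valid {a b c : String × Int} (ha : validL a.1) (hb : validL b.1)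
    (hc : validL c.1) : qmul (qmul a b) c = qmul a (qmul b c) := by
  obtain ⟨la, ca⟩ := a; obtain ⟨lb, cb⟩ := b; obtain ⟨lc, cc⟩ := c
  rcases ha with rfl | rfl | rfl | rfl <;> rcases hb with rfl | rfl | rfl | rfl <;>
    rcases hc with rfl | rfl | rfl | rfl <;> simp [qmul] <;> ring

-- reference power: p x n = x * (x * (… * ('1',1)))
def p (x : String × Int) : Nat → String × Int
  | 0 => ("1", 1)
  | n + 1 => qmul x (p x n)

lemma p_one (x : String × Int) : p x 1 = x := by
  simp [p, mul_one_right]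

lemma validL_p {x : String × Int} (hx : validL x.1) (n : Nat) : validL (p x n).1 := by
  induction n with
  | zero => simp [p, validL]
  | succ n ih => exact validL_mul hx ih

lemma p_add {x : String × Int} (hx : validL x.1) (m n : Nat) :
    qmul (p x m) (p x n) = p x (m + n) := by
  induction m with
  | zero => simp [p, mul_one_left]
  | succ m ih =>
    have : qmul (p x (m + 1)) (p x n) = qmul x (qmul (p x m) (p x n)) := by
      simpa [p] using mul_assoc_valid hx (validL_p hx m) (validL_p hx n)
    rw [this, ih]
    have : m + 1 + n = (m + n) + 1 := by omega
    rw [this]; rfl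

lemma pwNat_eq_p {x : String × Int} (hx : validL x.1) (n : Nat) :
    pwNat x n = p x n := by
  induction n using Nat.strong_induction_on with
  | _ n ih =>
    rw [pwNat]
    by_cases h0 : n = 0
    · simp [h0, p]
    · by_cases h1 : n = 1
      · simp [h1, p_one]
      · have hlt : n / 2 < n := Nat.div_lt_self (by omega) (by omega)
        simp only [h0, h1, if_false]
        rw [ih _ hlt, p_add hx]
        by_cases hp : n % 2 = 1
        · have he : n / 2 + n / 2 + 1 = n := by omega
          rw [if_pos hp]
          calc qmul x (p x (n / 2 + n / 2)) = p x (n / 2 + n / 2 + 1) := rfl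
            _ = p x n := by rw [he]
        · have he : n / 2 + n / 2 = n := by omega
          simp [hp, he]

-- closed form for the scalar unit
lemma p_scalar (c : Int) (n : Nat) : p ("1", c) n = ("1", c ^ n) := by
  induction n with
  | zero => simp [p]
  | succ n ih => simp [p, ih, qmul, pow_succ]; ring

-- closed form for a genuine imaginary unit: period-4 cycle of letter and sign
lemma p_unit {u : String} (hu : u = "i" ∨ u = "j" ∨ u = "k") (c : Int) (n : Nat) :
    p (u, c) n = ((if n % 2 = 0 then "1" else u),
      (if n % 4 = 2 ∨ n % 4 = 3 then (-1 : Int) else 1) * c ^ n) := by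
  induction n with
  | zero => simp [p]
  | succ n ih =>
    have h4 : n % 4 = 0 ∨ n % 4 = 1 ∨ n % 4 = 2 ∨ n % 4 = 3 := by omega
    rw [p, ih]
    rcases hu with rfl | rfl | rfl <;>
      rcases h4 with h | h | h | h <;>
      · have h2 : n % 2 = n % 4 % 2 := by omega
        have h2' : (n + 1) % 2 = (n + 1) % 4 % 2 := by omega
        have h4' : (n + 1) % 4 = (n % 4 + 1) % 4 := by omega
        rw [h2, h2', h4', h]
        simp [qmul, pow_succ]
        ring_nf

-- ===== VERDICT (by name: the statement is the Claim_ definition above) =====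
theorem pw_spec : Claim_equal_pw := by
  intro x a _ hpre
  obtain ⟨ha, hcase⟩ := hpre
  obtain ⟨l, c⟩ := x
  unfold Spec_pw pw pw_alt
  rw [if_neg (by omega : ¬ a < 0)]
  have han : (a.toNat : Int) = a := Int.toNat_of_nonneg ha
  by_cases hl : l = "1"
  · subst hl
    rw [pwNat_eq_p (Or.inl rfl), p_scalar]
    simp
  · rcases hcase with hsmall | hv
    · -- a = 0 or a = 1 with an arbitrary letter
      have : a = 0 ∨ a = 1 := by omega
      rcases this with rfl | rfl
      · rw [pwNat]; simp
      · rw [pwNat]; simp [hl]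
    · have hu : l = "i" ∨ l = "j" ∨ l = "k" := by tauto
      have hx : validL (l, c).1 := by unfold validL; tauto
      rw [pwNat_eq_p hx, p_unit hu]
      simp only [hl, false_or, ne_eq, not_false_eq_true, true_and]
      rw [Prod.mk.injEq]
      constructor
      · split_ifs with h1 h2 h2 <;> first | rfl | (exfalso; omega)
      · congr 1
        split_ifs with h1 h2 h2 <;> first | rfl | (exfalso; omega)
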